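-- pv_equiv track=rewrite | github.com/jgfranco/formation | 2024_01/matrixSpeedDrill7.py | solution
-- ===== SOURCE A (Python) =====
-- def solution(m):
--
--     left = 0
--     right = len(m[0]) -1
--     top = 0
--     bottom = len(m) -1
--     s = 0
--     for row in range(len(m)):
--         for col in range(len(m[0])):
--             if row == top or row == bottom or col == left or col == right: continue
--             s += m[row][col]
--
--
--     return s
-- ===== SOURCE B (Python) =====
-- def solution(m):
--     w = len(m[0])
--     if len(m) < 3 or w < 3:
--         return 0
--     return sum(sum(row[1:w-1]) for row in m[1:-1])
-- ===== Notes on version B (the rewrite author's own statement) =====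
-- stated objective: simpler
-- what changed: drops the per-cell border test over every cell: after a small-matrix guard, B sums the interior sub-matrix directly by slicing m[1:-1] and row[1:w-1]
import Mathlib
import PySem

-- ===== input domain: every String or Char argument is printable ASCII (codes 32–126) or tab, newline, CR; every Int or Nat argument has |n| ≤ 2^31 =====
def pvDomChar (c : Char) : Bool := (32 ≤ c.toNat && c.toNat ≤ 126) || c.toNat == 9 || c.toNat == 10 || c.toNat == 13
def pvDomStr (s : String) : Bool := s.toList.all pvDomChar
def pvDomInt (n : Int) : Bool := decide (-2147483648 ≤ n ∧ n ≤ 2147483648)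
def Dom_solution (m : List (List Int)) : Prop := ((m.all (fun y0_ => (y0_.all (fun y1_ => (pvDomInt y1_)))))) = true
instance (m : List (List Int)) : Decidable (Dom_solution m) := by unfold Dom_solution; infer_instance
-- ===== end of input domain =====

-- B sums the interior sub-matrix directly via slices m[1:-1] / row[1:w-1] behind a
-- small-matrix guard, instead of A's per-cell border test over every cell (objective: simpler).

-- ===== PORT A =====
def solution (m : List (List Int)) : Int :=
  let left : Int := 0
  let right : Int := ((PySem.List.pyGetD m 0 []).length : Int) - 1
  let top : Int := 0
  let bottom : Int := (m.length : Int) - 1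
  (PySem.List.pyRange 0 (m.length : Int) 1).foldl (fun s row =>
    (PySem.List.pyRange 0 ((PySem.List.pyGetD m 0 []).length : Int) 1).foldl (fun s col =>
      if row == top || row == bottom || col == left || col == right then s
      else s + PySem.List.pyGetD (PySem.List.pyGetD m row []) col 0) s) 0

-- ===== PORT B =====
def solution_alt (m : List (List Int)) : Int :=
  let w : Int := ((PySem.List.pyGetD m 0 []).length : Int)
  if (m.length : Int) < 3 || w < 3 then 0
  else (PySem.List.slice m (some 1) (some (-1))).foldl
        (fun s row => s + (PySem.List.slice row (some 1) (some (w - 1))).sum) 0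

-- ===== PRECONDITION & SPEC =====
-- Pre_ excludes exactly the inputs on which A raises: the empty matrix (IndexError on m[0]),
-- and ragged matrices whose first row has length >= 3 while some interior row is shorter
-- than len(m[0]) - 1 (IndexError on m[row][col]).
def Pre_solution (m : List (List Int)) : Prop :=
  m ≠ [] ∧ (3 ≤ (m.headD []).length →
    ∀ row ∈ m.tail.dropLast, (m.headD []).length ≤ row.length + 1)
instance (m : List (List Int)) : Decidable (Pre_solution m) := by
  unfold Pre_solution; infer_instance
def pvWitness_solution : List (List Int) := [[1, 2, 3], [4, 5, 6], [7, 8, 9]]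

def Spec_solution (m : List (List Int)) (out : Int) : Prop := out = solution_alt m
instance (m : List (List Int)) (out : Int) : Decidable (Spec_solution m out) := by unfold Spec_solution; infer_instance

-- ===== CLAIM (what is proved, stated in full; the proofs are below) =====
def Claim_equal_solution : Prop := ∀ (m : List (List Int)), Dom_solution m → Pre_solution m → Spec_solution m (solution m)

-- ===== LEMMAS AND PROOFS =====

-- a fold whose skip-condition always fires leaves the accumulator unchanged
lemma foldl_if_skip (l : List Int) (c : Int → Bool) (g : Int → Int) (s : Int)
    (h : ∀ x ∈ l, c x = true) :
    l.foldl (fun s x => if c x then s else s + g x) s = s := by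
  rw [PySem.List.foldl_congr_mem _ _ (fun s _ => s) _ (by intro acc x hx; simp [h x hx])]
  exact PySem.List.foldl_ignore l s

-- indexing a window of a list over List.range is the drop/take window
lemma map_f_getD_range {α β : Type} (f : α → β) (xs : List α) (d : α) (a k : Nat)
    (h : a + k ≤ xs.length) :
    (List.range k).map (fun i => f (xs.getD (a + i) d)) = ((xs.drop a).take k).map f := by
  apply List.ext_getElem
  · simp; omega
  · intro i h1 h2
    simp only [List.getElem_map, List.getElem_range, List.getElem_take, List.getElem_drop]
    have hi : a + i < xs.length := by simp at h1; omega
    rw [List.getD_eq_getElem xs d hi]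

-- xs[1:-1] drops the first and last element
lemma slice_one_neg_one {α : Type} (xs : List α) :
    PySem.List.slice xs (some 1) (some (-1)) = xs.tail.dropLast := by
  simp [PySem.List.slice]
  cases xs with
  | nil => simp
  | cons x t => simp [List.dropLast_eq_take]

lemma tail_dropLast_eq {α : Type} (m : List α) :
    m.tail.dropLast = (m.drop 1).take (m.length - 2) := by
  rw [List.dropLast_eq_take, ← List.drop_one]
  congr 1
  simp
  omega

-- an element at an interior index is in m[1:-1]
lemma pv_mem_interior {α : Type} (m : List α) (i : Nat) (h1 : 1 ≤ i) (h2 : i + 1 < m.length) :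
    m[i]'(by omega) ∈ m.tail.dropLast := by
  have hl : i - 1 < m.tail.dropLast.length := by simp; omega
  have e : m.tail.dropLast[i-1]'hl = m[i]'(by omega) := by
    rw [List.getElem_dropLast, List.getElem_tail]
    congr 1
    omega
  exact e ▸ List.getElem_mem hl

-- A's inner column loop on an interior row adds exactly sum(row[1:w-1])
lemma inner_interior (xs : List Int) (w : Nat) (hw : 3 ≤ w) (hlen : w ≤ xs.length + 1)
    (row top bottom : Int) (hrt : row ≠ top) (hrb : row ≠ bottom) (s : Int) :
    (PySem.List.pyRange 0 (w : Int) 1).foldl (fun s col =>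
        if row == top || row == bottom || col == 0 || col == (w : Int) - 1 then s
        else s + PySem.List.pyGetD xs col 0) s
    = s + (PySem.List.slice xs (some 1) (some ((w : Int) - 1))).sum := by
  rw [PySem.List.pyRange_one_append 0 1 (w : Int) (by omega) (by omega),
      PySem.List.pyRange_one_append 1 ((w : Int) - 1) (w : Int) (by omega) (by omega)]
  have h1 : PySem.List.pyRange 0 1 1 = [0] := PySem.List.pyRange_one_singleton 0
  have h2 : PySem.List.pyRange ((w : Int) - 1) (w : Int) 1 = [(w : Int) - 1] := by
    have := PySem.List.pyRange_one_singleton ((w : Int) - 1)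
    rw [sub_add_cancel] at this; exact this
  rw [h1, h2, List.foldl_append, List.foldl_append]
  simp only [List.foldl_cons, List.foldl_nil, beq_self_eq_true, Bool.or_true, Bool.true_or,
    if_true]
  rw [PySem.List.foldl_congr_mem _ _ (fun s col => s + PySem.List.pyGetD xs col 0) _
      (by
        intro acc col hcol
        rw [PySem.List.mem_pyRange_one] at hcol
        have hc : (row == top || row == bottom || col == 0 || col == (w : Int) - 1) = false := by
          simp only [Bool.or_eq_false_iff, beq_eq_false_iff_ne]
          refine ⟨⟨⟨hrt, hrb⟩, by omega⟩, by omega⟩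
        rw [hc]; simp)]
  rw [PySem.List.foldl_add]
  congr 1
  rw [PySem.List.pyRange_one 1 ((w : Int) - 1), List.map_map]
  have hk : ((w : Int) - 1 - 1).toNat = w - 2 := by omega
  rw [hk]
  have hpt : (fun k : Nat => PySem.List.pyGetD xs (1 + (k : Int)) 0)
       = fun k : Nat => xs.getD (1 + k) 0 := by
    funext k
    have : (1 : Int) + (k : Int) = ((1 + k : Nat) : Int) := by push_cast; ring
    rw [this, PySem.List.pyGetD_natCast]
  rw [show ((fun j => PySem.List.pyGetD xs j 0) ∘ fun k : Nat => 1 + (k : Int))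
        = fun k : Nat => PySem.List.pyGetD xs (1 + (k : Int)) 0 from rfl, hpt]
  rw [map_f_getD_range (fun x => x) xs 0 1 (w - 2) (by omega)]
  simp only [List.map_id']
  have hb : (w : Int) - 1 = ((w - 1 : Nat) : Int) := by omega
  rw [hb, show (1 : Int) = ((1 : Nat) : Int) from rfl, PySem.List.slice_natCast]
  congr 2

lemma main_thm : ∀ (m : List (List Int)), Pre_solution m → solution m = solution_alt m := by
  intro m hpre
  obtain ⟨hne, hrag⟩ := hpre
  obtain ⟨a, l, rfl⟩ := List.exists_cons_of_ne_nil hne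
  simp only [List.headD_cons] at hrag
  simp only [solution, solution_alt, PySem.List.pyGetD_zero_cons, List.length_cons]
  by_cases hbig : 3 ≤ l.length + 1 ∧ 3 ≤ a.length
  · obtain ⟨hn, hw⟩ := hbig
    -- B side: guard is false
    rw [if_neg (by simp only [Bool.or_eq_true, decide_eq_true_eq, not_or]; constructor <;> [push_cast; push_cast] <;> omega)]
    rw [slice_one_neg_one, tail_dropLast_eq, PySem.List.foldl_add]
    simp only [List.length_cons]
    -- A side: split rows [0] ++ interior ++ [n-1]
    rw [PySem.List.pyRange_one_append 0 1 ((l.length + 1 : Nat) : Int) (by omega) (by push_cast; omega),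
        PySem.List.pyRange_one_append 1 (((l.length + 1 : Nat) : Int) - 1) ((l.length + 1 : Nat) : Int)
          (by push_cast; omega) (by omega)]
    have h1 : PySem.List.pyRange 0 1 1 = [0] := PySem.List.pyRange_one_singleton 0
    have h2 : PySem.List.pyRange (((l.length + 1 : Nat) : Int) - 1) ((l.length + 1 : Nat) : Int) 1
        = [((l.length + 1 : Nat) : Int) - 1] := by
      have := PySem.List.pyRange_one_singleton (((l.length + 1 : Nat) : Int) - 1)
      rw [sub_add_cancel] at this; exact this
    rw [h1, h2, List.foldl_append, List.foldl_append]
    simp only [List.foldl_cons, List.foldl_nil]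
    -- row 0 contributes nothing
    rw [foldl_if_skip _ _ _ _ (by intro col _; simp)]
    -- interior rows compute their slice sums
    rw [PySem.List.foldl_congr_mem _ _
        (fun s row => s + (PySem.List.slice (PySem.List.pyGetD (a :: l) row [])
            (some 1) (some ((a.length : Int) - 1))).sum) _
        (by
          intro acc row hrow
          rw [PySem.List.mem_pyRange_one] at hrow
          have hr0 : (0:Int) ≤ row := by omega
          have hrlt : row < ((l.length + 1 : Nat) : Int) := by push_cast at hrow ⊢; omega
          have hrn : row.toNat < (a :: l).length := by simp only [List.length_cons]; omega
          have hmem : (a :: l)[row.toNat]'hrn ∈ (a :: l).tail.dropLast := by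
            apply pv_mem_interior _ _ (by omega)
            simp only [List.length_cons]
            push_cast at hrow
            omega
          have hlen : a.length ≤ (PySem.List.pyGetD (a :: l) row []).length + 1 := by
            rw [PySem.List.pyGetD_eq_getElem _ _ hr0 (by simpa using hrlt)]
            exact hrag hw _ hmem
          exact inner_interior _ a.length hw hlen row 0 (((l.length + 1 : Nat) : Int) - 1)
            (by omega) (by push_cast at hrow ⊢; omega) acc)]
    rw [PySem.List.foldl_add]
    -- last row contributes nothing
    rw [foldl_if_skip _ _ _ _ (by intro col _; simp)]
    -- identify the two maps
    congr 1
    rw [PySem.List.pyRange_one 1 (((l.length + 1 : Nat) : Int) - 1), List.map_map]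
    have hk : ((((l.length + 1 : Nat) : Int) - 1) - 1).toNat = (l.length + 1) - 2 := by
      push_cast; omega
    rw [hk]
    have hpt : ((fun row => (PySem.List.slice (PySem.List.pyGetD (a :: l) row [])
            (some 1) (some ((a.length : Int) - 1))).sum) ∘ fun k : Nat => (1 : Int) + (k : Int))
        = fun k : Nat => (fun xs => (PySem.List.slice xs
            (some 1) (some ((a.length : Int) - 1))).sum) ((a :: l).getD (1 + k) []) := by
      funext k
      have hc : (1 : Int) + (k : Int) = ((1 + k : Nat) : Int) := by push_cast; ring
      simp only [Function.comp, hc, PySem.List.pyGetD_natCast]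
    rw [hpt, map_f_getD_range
      (fun xs => (PySem.List.slice xs (some 1) (some ((a.length : Int) - 1))).sum)
      (a :: l) [] 1 ((l.length + 1) - 2)
      (by simp only [List.length_cons]; omega)]
  · -- small matrix: both sides are 0
    rw [if_pos (by
      simp only [Bool.or_eq_true, decide_eq_true_eq]
      push_cast
      omega)]
    rw [PySem.List.foldl_congr_mem _ _ (fun s _ => s) _
        (by
          intro acc row hrow
          rw [PySem.List.mem_pyRange_one] at hrow
          apply foldl_if_skip
          intro col hcol
          rw [PySem.List.mem_pyRange_one] at hcol
          simp only [Bool.or_eq_true, beq_iff_eq]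
          push_cast at hrow hcol ⊢
          omega)]
    exact PySem.List.foldl_ignore _ _

-- ===== VERDICT (by name: the statement is the Claim_ definition above) =====
theorem solution_spec : Claim_equal_solution := by
  intro m _ hpre
  exact main_thm m hpre
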